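-- pv_equiv track=rewrite | github.com/shashankkarthik/CSE | CSE 231/Computer Projects/project09/proj09.py | validate_move_within_tableau
-- ===== SOURCE A (Python) =====
-- def validate_move_within_tableau(tableau, from_col, to_col):
--     '''Return True if the rules allow the bottom card in the tableau column
--        specified by from_col to be moved to the tableau column specified by
--        to_col; False, otherwise.
--        If the move is invalid, print an appropriate error message.
--     '''
--
--     bottom_cards = []
--     for col in tableau:
--         if len(col) > 0:
--             last_card = col[-1]
--         else:
--             last_card = []
--         bottom_cards.append(last_card)
--     if bottom_cards[to_col - 1] == []:
--         return True
--     else: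
--         return False
-- ===== SOURCE B (Python) =====
-- def validate_move_within_tableau(tableau, from_col, to_col):
--     '''Return True iff the target tableau column (to_col, 1-based, Python
--        negative indexing preserved) is empty.'''
--     return len(tableau[to_col - 1]) == 0
-- ===== Notes on version B (the rewrite author's own statement) =====
-- stated objective: simpler
-- what changed: Replaces the full pass building a bottom_cards list (with a mixed-type [] sentinel and an '== []' test) by a single direct index into tableau: the target column is empty iff its length is 0, since a string bottom card never equals [].
import Mathlib
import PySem

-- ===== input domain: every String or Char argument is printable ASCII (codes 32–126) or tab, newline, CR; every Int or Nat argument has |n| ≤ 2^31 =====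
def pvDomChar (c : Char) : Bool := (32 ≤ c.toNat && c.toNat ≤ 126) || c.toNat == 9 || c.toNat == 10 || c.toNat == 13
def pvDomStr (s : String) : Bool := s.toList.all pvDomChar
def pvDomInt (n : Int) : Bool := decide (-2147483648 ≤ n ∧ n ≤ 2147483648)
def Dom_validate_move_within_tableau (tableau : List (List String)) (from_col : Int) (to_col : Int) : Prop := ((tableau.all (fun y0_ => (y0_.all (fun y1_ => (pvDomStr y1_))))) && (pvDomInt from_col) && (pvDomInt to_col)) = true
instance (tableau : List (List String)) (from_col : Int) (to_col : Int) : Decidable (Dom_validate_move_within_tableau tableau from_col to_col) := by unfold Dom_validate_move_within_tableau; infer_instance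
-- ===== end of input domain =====

-- B: the target column is empty iff its length is 0 (O(1) direct index instead of
-- building the bottom_cards list); Pre_ excludes the IndexError of an out-of-range to_col.

-- ===== PORT A =====
-- bottom_cards mixes strings and []; ported as List (Option String), none encoding the [] sentinel,
-- so 'last_card == []' becomes '= some none'. col[-1] and bottom_cards[to_col-1] via pyGet? (exact).
def validate_move_within_tableau (tableau : List (List String)) (from_col : Int) (to_col : Int) : Bool :=
  let bottom_cards : List (Option String) :=
    tableau.foldl (fun acc col =>
      let last_card : Option String :=
        if col.length > 0 then PySem.List.pyGet? col (-1) else none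
      acc ++ [last_card]) []
  match PySem.List.pyGet? bottom_cards (to_col - 1) with
  | some last => if last = none then true else false
  | none => false  -- IndexError in Python; excluded by Pre_

-- ===== PORT B =====
def validate_move_within_tableau_alt (tableau : List (List String)) (from_col : Int) (to_col : Int) : Bool :=
  match PySem.List.pyGet? tableau (to_col - 1) with
  | some col => col.length == 0
  | none => false  -- IndexError in Python; excluded by Pre_

-- ===== PRECONDITION & SPEC =====
-- Pre_: to_col - 1 must be a valid (possibly negative) Python index into tableau, else A raises IndexError.
def Pre_validate_move_within_tableau (tableau : List (List String)) (from_col : Int) (to_col : Int) : Prop :=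
  PySem.Raise.InRange tableau.length (to_col - 1)
instance (tableau : List (List String)) (from_col : Int) (to_col : Int) : Decidable (Pre_validate_move_within_tableau tableau from_col to_col) := by unfold Pre_validate_move_within_tableau; infer_instance
def pvWitness_validate_move_within_tableau : List (List String) × Int × Int := ([["4H"], []], 1, 2)
def Spec_validate_move_within_tableau (tableau : List (List String)) (from_col : Int) (to_col : Int) (out : Bool) : Prop := out = validate_move_within_tableau_alt tableau from_col to_col
instance (tableau : List (List String)) (from_col : Int) (to_col : Int) (out : Bool) : Decidable (Spec_validate_move_within_tableau tableau from_col to_col out) := by unfold Spec_validate_move_within_tableau; infer_instance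

-- ===== CLAIM (what is proved, stated in full; the proofs are below) =====
def Claim_equal_validate_move_within_tableau : Prop := ∀ (tableau : List (List String)) (from_col : Int) (to_col : Int), Dom_validate_move_within_tableau tableau from_col to_col → Pre_validate_move_within_tableau tableau from_col to_col → Spec_validate_move_within_tableau tableau from_col to_col (validate_move_within_tableau tableau from_col to_col)

-- ===== LEMMAS AND PROOFS =====
theorem pv_foldl_append_map {α β : Type} (f : α → β) (l : List α) (acc : List β) :
    l.foldl (fun a x => a ++ [f x]) acc = acc ++ l.map f := by
  induction l generalizing acc with
  | nil => simp
  | cons x xs ih => simp [List.foldl, ih]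

theorem pv_map_pyGet? {α β : Type} (f : α → β) (l : List α) (i : Int) :
    PySem.List.pyGet? (l.map f) i = (PySem.List.pyGet? l i).map f := by
  simp [PySem.List.pyGet?, PySem.List.pyIdx?]

theorem pv_lastcard_none (col : List String) :
    (if col.length > 0 then PySem.List.pyGet? col (-1) else none) = none ↔ col.length = 0 := by
  rcases col.eq_nil_or_concat with rfl | ⟨ys, y, rfl⟩
  · simp
  · simp [PySem.List.pyGet?_neg_one_append_singleton]

-- ===== VERDICT (by name: the statement is the Claim_ definition above) =====
theorem validate_move_within_tableau_spec : Claim_equal_validate_move_within_tableau := by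
  intro tableau from_col to_col _ hpre
  unfold Spec_validate_move_within_tableau
  unfold validate_move_within_tableau validate_move_within_tableau_alt
  have hb : (tableau.foldl (fun acc col =>
      acc ++ [if col.length > 0 then PySem.List.pyGet? col (-1) else none]) ([] : List (Option String)))
      = tableau.map (fun col => if col.length > 0 then PySem.List.pyGet? col (-1) else none) := by
    simpa using pv_foldl_append_map
      (fun col : List String => if col.length > 0 then PySem.List.pyGet? col (-1) else none) tableau []
  simp only [hb, pv_map_pyGet?]
  rcases h : PySem.List.pyGet? tableau (to_col - 1) with _ | col
  · simp
  · simp only [Option.map_some]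
    rcases hcol : (if col.length > 0 then PySem.List.pyGet? col (-1) else none) with _ | s
    · have : col.length = 0 := (pv_lastcard_none col).mp hcol
      simp [this]
    · have : ¬ col.length = 0 := by
        intro h0
        rw [(pv_lastcard_none col).mpr h0] at hcol
        exact absurd hcol (by simp)
      simp [this]
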